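-- pv_equiv track=rewrite | github.com/remtbkv/AI | DP Interlude/5 Turatbekov Rem dp.py | candy_jar
-- ===== SOURCE A (Python) =====
-- def candy_jar(shelf, i, memo):
--     if i in memo:
--         return memo[i]
--     if i == len(shelf):
--         return 0
--     if i == len(shelf)-1:
--         return max(shelf[i], 0)
--     memo[i] = max(candy_jar(shelf, i+1, memo), shelf[i]+candy_jar(shelf,i+1, memo), shelf[i]*shelf[i+1]+candy_jar(shelf, i+2, memo))
--     return memo[i]
-- ===== SOURCE B (Python) =====
-- def candy_jar(shelf, i, memo):
--     # Iterative bottom-up DP over the same recurrence (return value matches A;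
--     # both fill `memo` in place, though the exact set of filled keys may differ).
--     if i in memo:
--         return memo[i]
--     n = len(shelf)
--     if i == n:
--         return 0
--     if i == n - 1:
--         return max(shelf[i], 0)
--
--     def val(k):
--         if k in memo:
--             return memo[k]
--         if k == n:
--             return 0
--         return max(shelf[k], 0)  # here k == n - 1
--
--     for j in range(n - 2, i - 1, -1):
--         if j not in memo:
--             memo[j] = max(val(j + 1),
--                           shelf[j] + val(j + 1),
--                           shelf[j] * shelf[j + 1] + val(j + 2))
--     return memo[i]
-- ===== Notes on version B (the rewrite author's own statement) =====
-- stated objective: alternative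
-- what changed: Replaces A's memoized top-down recursion with an iterative bottom-up DP: one descending loop from len(shelf)-2 to i fills the missing memo entries from the same recurrence, so there is no recursion at all (return value identical; both mutate memo, though the set of keys filled may differ).
import Mathlib
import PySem

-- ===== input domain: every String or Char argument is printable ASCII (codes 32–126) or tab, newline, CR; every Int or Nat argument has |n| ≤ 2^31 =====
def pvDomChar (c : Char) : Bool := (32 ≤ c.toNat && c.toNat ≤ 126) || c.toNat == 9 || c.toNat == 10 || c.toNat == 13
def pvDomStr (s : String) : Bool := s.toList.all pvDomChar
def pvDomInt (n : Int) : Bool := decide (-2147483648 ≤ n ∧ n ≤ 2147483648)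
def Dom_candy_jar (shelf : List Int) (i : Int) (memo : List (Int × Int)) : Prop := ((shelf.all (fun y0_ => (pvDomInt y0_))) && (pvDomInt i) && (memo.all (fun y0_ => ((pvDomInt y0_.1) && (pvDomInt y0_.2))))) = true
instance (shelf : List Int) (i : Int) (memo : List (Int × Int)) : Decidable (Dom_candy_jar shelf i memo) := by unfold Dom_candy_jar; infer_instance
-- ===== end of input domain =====

-- B replaces A's memoized top-down recursion by an iterative bottom-up DP loop over the
-- same recurrence (objective: alternative). Equivalence is about the RETURN value only:
-- both Pythons mutate `memo` in place, but the set of keys they fill may differ.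

-- ===== PORT A =====
-- shelf[j] (Python negative indexing); the default 0 is only reached outside Pre_.
def pvShelfA (shelf : List Int) (j : Int) : Int := (PySem.List.pyGet? shelf j).getD 0

-- A's recursion, with the mutated dict threaded through; fuel only makes it total
-- (fuel runs out only where the Python recursion diverges, which is outside Pre_).
def candyA (shelf : List Int) : Nat → Int → PySem.Dict Int Int → Int × PySem.Dict Int Int
  | 0, _, m => (0, m)
  | fuel+1, i, m =>
    match m.get? i with
    | some v => (v, m)
    | none =>
      if i = (shelf.length : Int) then (0, m)
      else if i = (shelf.length : Int) - 1 then (max (pvShelfA shelf i) 0, m)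
      else
        let r1 := candyA shelf fuel (i+1) m
        let r2 := candyA shelf fuel (i+1) r1.2
        let r3 := candyA shelf fuel (i+2) r2.2
        let v := max (max r1.1 (pvShelfA shelf i + r2.1))
                     (pvShelfA shelf i * pvShelfA shelf (i+1) + r3.1)
        (v, r3.2.insert i v)

def candy_jar (shelf : List Int) (i : Int) (memo : List (Int × Int)) : Int :=
  (candyA shelf (((shelf.length : Int) - i).toNat + 1) i (PySem.Dict.ofList memo)).1

-- ===== PORT B =====
-- shelf[k] for B (Python negative indexing); default only reached outside Pre_.
def pvShelfB (shelf : List Int) (k : Int) : Int := (PySem.List.pyGet? shelf k).getD 0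

-- B's helper `val(k)`: memo[k] if present, else the base value (k is n or n-1 there).
def pvValB (shelf : List Int) (n : Int) (m : PySem.Dict Int Int) (k : Int) : Int :=
  match m.get? k with
  | some v => v
  | none => if k = n then 0 else max (pvShelfB shelf k) 0

-- one iteration of B's loop body: `if j not in memo: memo[j] = max(...)`.
def pvStepB (shelf : List Int) (n : Int) (m : PySem.Dict Int Int) (j : Int) : PySem.Dict Int Int :=
  if m.contains j then m
  else
    m.insert j (max (max (pvValB shelf n m (j+1)) (pvShelfB shelf j + pvValB shelf n m (j+1)))
                    (pvShelfB shelf j * pvShelfB shelf (j+1) + pvValB shelf n m (j+2)))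

def candy_jar_alt (shelf : List Int) (i : Int) (memo : List (Int × Int)) : Int :=
  match (PySem.Dict.ofList memo).get? i with
  | some v => v
  | none =>
    if i = (shelf.length : Int) then 0
    else if i = (shelf.length : Int) - 1 then max (pvShelfB shelf i) 0
    else
      (((PySem.List.pyRange ((shelf.length : Int) - 2) (i-1) (-1)).foldl
          (pvStepB shelf (shelf.length : Int)) (PySem.Dict.ofList memo)).get? i).getD 0

-- ===== PRECONDITION & SPEC =====
-- Pre_ excludes exactly the inputs where the Python A raises: i not a memo key and
-- outside [-len(shelf), len(shelf)] (IndexError below that range, unbounded recursion above it).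
def Pre_candy_jar (shelf : List Int) (i : Int) (memo : List (Int × Int)) : Prop :=
  i ∈ memo.map Prod.fst ∨ (-(shelf.length : Int) ≤ i ∧ i ≤ (shelf.length : Int))
instance (shelf : List Int) (i : Int) (memo : List (Int × Int)) : Decidable (Pre_candy_jar shelf i memo) := by unfold Pre_candy_jar; infer_instance

def pvWitness_candy_jar : List Int × Int × (List (Int × Int)) := ([2, -3, 5], 0, [(1, 100)])

def Spec_candy_jar (shelf : List Int) (i : Int) (memo : List (Int × Int)) (out : Int) : Prop := out = candy_jar_alt shelf i memo
instance (shelf : List Int) (i : Int) (memo : List (Int × Int)) (out : Int) : Decidable (Spec_candy_jar shelf i memo out) := by unfold Spec_candy_jar; infer_instance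

-- ===== CLAIM (what is proved, stated in full; the proofs are below) =====
def Claim_equal_candy_jar : Prop := ∀ (shelf : List Int) (i : Int) (memo : List (Int × Int)), Dom_candy_jar shelf i memo → Pre_candy_jar shelf i memo → Spec_candy_jar shelf i memo (candy_jar shelf i memo)

-- ===== LEMMAS AND PROOFS =====

-- The value both programs compute: the recurrence with the INITIAL memo consulted
-- first (pre-populated entries are honored and never overwritten by either program).
def pvV (shelf : List Int) (m0 : PySem.Dict Int Int) (i : Int) : Int :=
  match m0.get? i with
  | some v => v
  | none =>
    if _h : (shelf.length : Int) - 1 ≤ i then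
      if i = (shelf.length : Int) - 1 then max (pvShelfA shelf i) 0 else 0
    else
      max (max (pvV shelf m0 (i+1)) (pvShelfA shelf i + pvV shelf m0 (i+1)))
          (pvShelfA shelf i * pvShelfA shelf (i+1) + pvV shelf m0 (i+2))
termination_by ((shelf.length : Int) - i).toNat
decreasing_by all_goals omega

lemma pvV_of_mem (shelf : List Int) (m0 : PySem.Dict Int Int) (i : Int) (v : Int)
    (h : m0.get? i = some v) : pvV shelf m0 i = v := by
  rw [pvV, h]

-- a key of the association list is present after Dict.update (used to read Pre_'s first disjunct)
lemma pvUpdate_isSome (l : List (Int × Int)) : ∀ (d : PySem.Dict Int Int) (k : Int),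
    ((d.get? k).isSome = true ∨ k ∈ l.map Prod.fst) → ((d.update l).get? k).isSome = true := by
  induction l with
  | nil =>
    intro d k h
    simpa [PySem.Dict.update] using h.resolve_right (by simp)
  | cons p l ih =>
    intro d k h
    have hu : d.update (p :: l) = (d.insert p.1 p.2).update l := by
      simp [PySem.Dict.update]
    rw [hu]
    apply ih
    by_cases hk : k = p.1
    · left; rw [PySem.Dict.get?_insert, if_pos hk]; rfl
    · rcases h with h | h
      · left; rw [PySem.Dict.get?_insert, if_neg hk]; exact h
      · right
        simp only [List.map_cons, List.mem_cons] at h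
        exact (h.resolve_left hk)

-- A's recursion returns pvV and keeps the memo coherent with pvV.
lemma candyA_correct (shelf : List Int) (m0 : PySem.Dict Int Int) :
    ∀ (fuel : Nat) (i : Int) (m : PySem.Dict Int Int),
    (∀ k v, m0.get? k = some v → m.get? k = some v) →
    (∀ k v, m.get? k = some v → v = pvV shelf m0 k) →
    i ≤ (shelf.length : Int) →
    ((shelf.length : Int) - i).toNat < fuel →
    (candyA shelf fuel i m).1 = pvV shelf m0 i ∧
    (∀ k v, m0.get? k = some v → (candyA shelf fuel i m).2.get? k = some v) ∧
    (∀ k v, (candyA shelf fuel i m).2.get? k = some v → v = pvV shelf m0 k) := by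
  intro fuel
  induction fuel with
  | zero => intro i m _ _ _ hf; omega
  | succ fuel ih =>
    intro i m hext hcoh hile hf
    rw [candyA]
    cases hm : m.get? i with
    | some v =>
      refine ⟨?_, hext, hcoh⟩
      show v = pvV shelf m0 i
      exact hcoh i v hm
    | none =>
      have hm0 : m0.get? i = none := by
        cases hm0 : m0.get? i with
        | none => rfl
        | some w => exact absurd (hext i w hm0) (by simp [hm])
      by_cases h1 : i = (shelf.length : Int)
      · simp only [if_pos h1]
        refine ⟨?_, hext, hcoh⟩
        rw [pvV, hm0]; subst h1; rw [dif_pos (by omega), if_neg (by omega)]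
      · by_cases h2 : i = (shelf.length : Int) - 1
        · simp only [if_neg h1, if_pos h2]
          refine ⟨?_, hext, hcoh⟩
          rw [pvV, hm0]; rw [dif_pos (by omega), if_pos h2]
        · simp only [if_neg h1, if_neg h2]
          obtain ⟨e1, x1, c1⟩ := ih (i+1) m hext hcoh (by omega) (by omega)
          obtain ⟨e2, x2, c2⟩ := ih (i+1) (candyA shelf fuel (i+1) m).2 x1 c1 (by omega) (by omega)
          obtain ⟨e3, x3, c3⟩ :=
            ih (i+2) (candyA shelf fuel (i+1) (candyA shelf fuel (i+1) m).2).2 x2 c2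
              (by omega) (by omega)
          have hval : max (max (candyA shelf fuel (i+1) m).1
                (pvShelfA shelf i + (candyA shelf fuel (i+1) (candyA shelf fuel (i+1) m).2).1))
                (pvShelfA shelf i * pvShelfA shelf (i+1) +
                  (candyA shelf fuel (i+2)
                    (candyA shelf fuel (i+1) (candyA shelf fuel (i+1) m).2).2).1)
              = pvV shelf m0 i := by
            rw [e1, e2, e3]
            conv_rhs => rw [pvV, hm0]
            rw [dif_neg (by omega)]
          refine ⟨hval, ?_, ?_⟩
          · intro k v hk
            rw [PySem.Dict.get?_insert]
            split
            · next heq => subst heq; rw [hm0] at hk; cases hk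
            · exact x3 k v hk
          · intro k v hk
            rw [PySem.Dict.get?_insert] at hk
            revert hk; split
            · next heq => intro hk; cases hk; subst heq; exact hval
            · intro hk; exact c3 k v hk

-- B's helper val reads pvV for indices just above the already-filled region [?, n-2].
lemma pvValB_correct (shelf : List Int) (m0 m : PySem.Dict Int Int) (a k : Int)
    (h1 : ∀ j, a < j → j ≤ (shelf.length : Int) - 2 → m.get? j = some (pvV shelf m0 j))
    (h2 : ∀ j, ¬(a < j ∧ j ≤ (shelf.length : Int) - 2) → m.get? j = m0.get? j)
    (hka : a < k) (hkn : k ≤ (shelf.length : Int)) :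
    pvValB shelf (shelf.length : Int) m k = pvV shelf m0 k := by
  by_cases hk : k ≤ (shelf.length : Int) - 2
  · rw [pvValB, h1 k hka hk]
  · have hmk : m.get? k = m0.get? k := h2 k (by omega)
    rw [pvValB, hmk]
    cases hm0 : m0.get? k with
    | some v => rw [pvV_of_mem shelf m0 k v hm0]
    | none =>
      conv_rhs => rw [pvV, hm0]
      rw [dif_pos (by omega)]
      by_cases hke : k = (shelf.length : Int) - 1
      · rw [if_pos hke, if_neg (by omega)]
        simp [pvShelfA, pvShelfB]
      · rw [if_neg hke, if_pos (by omega)]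

-- B's loop from a down to i fills [i, n-2] with pvV (pre-existing entries untouched).
lemma bLoop_correct (shelf : List Int) (m0 : PySem.Dict Int Int) (i : Int) :
    ∀ (t : Nat) (a : Int) (m : PySem.Dict Int Int), (a - (i-1)).toNat = t →
    i - 1 ≤ a → a ≤ (shelf.length : Int) - 2 →
    (∀ j, a < j → j ≤ (shelf.length : Int) - 2 → m.get? j = some (pvV shelf m0 j)) →
    (∀ j, ¬(a < j ∧ j ≤ (shelf.length : Int) - 2) → m.get? j = m0.get? j) →
    (∀ j, i - 1 < j → j ≤ (shelf.length : Int) - 2 →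
      ((PySem.List.pyRange a (i-1) (-1)).foldl (pvStepB shelf (shelf.length : Int)) m).get? j
        = some (pvV shelf m0 j)) := by
  intro t
  induction t with
  | zero =>
    intro a m ht h1 h2 hfill hrest
    have ha : a = i - 1 := by omega
    subst ha
    rw [PySem.List.pyRange_neg_one_eq_nil (by omega)]
    exact hfill
  | succ t ih =>
    intro a m ht h1 h2 hfill hrest
    have ha : i - 1 < a := by omega
    rw [PySem.List.pyRange_neg_one_cons ha]
    simp only [List.foldl_cons]
    have hma : m.get? a = m0.get? a := hrest a (by omega)
    have hstep : ∀ j, a - 1 < j → j ≤ (shelf.length : Int) - 2 →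
        (pvStepB shelf (shelf.length : Int) m a).get? j = some (pvV shelf m0 j) := by
      intro j hj1 hj2
      rw [pvStepB, PySem.Dict.contains_eq_isSome_get?, hma]
      cases hm0 : m0.get? a with
      | some v =>
        simp only [Option.isSome_some, if_true]
        by_cases hja : j = a
        · subst hja; rw [hma, hm0, pvV_of_mem shelf m0 j v hm0]
        · exact hfill j (by omega) hj2
      | none =>
        simp only [Option.isSome_none, Bool.false_eq_true, if_false]
        rw [PySem.Dict.get?_insert]
        split
        · next heq =>
          subst heq
          rw [pvValB_correct shelf m0 m j (j+1) hfill hrest (by omega) (by omega),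
              pvValB_correct shelf m0 m j (j+2) hfill hrest (by omega) (by omega)]
          conv_rhs => rw [pvV, hm0]
          rw [dif_neg (by omega)]
          simp [pvShelfA, pvShelfB]
        · next hne => exact hfill j (by omega) hj2
    have hstepRest : ∀ j, ¬(a - 1 < j ∧ j ≤ (shelf.length : Int) - 2) →
        (pvStepB shelf (shelf.length : Int) m a).get? j = m0.get? j := by
      intro j hj
      rw [pvStepB, PySem.Dict.contains_eq_isSome_get?, hma]
      cases hm0 : m0.get? a with
      | some v => simp only [Option.isSome_some, if_true]; exact hrest j (by omega)
      | none =>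
        simp only [Option.isSome_none, Bool.false_eq_true, if_false]
        rw [PySem.Dict.get?_insert, if_neg (by omega : ¬ j = a)]
        exact hrest j (by omega)
    exact ih (a-1) (pvStepB shelf (shelf.length : Int) m a) (by omega) (by omega) (by omega)
      hstep hstepRest

-- ===== VERDICT (by name: the statement is the Claim_ definition above) =====
theorem candy_jar_spec : Claim_equal_candy_jar := by
  intro shelf i memo _hdom hpre
  unfold Spec_candy_jar candy_jar candy_jar_alt
  cases hm0 : (PySem.Dict.ofList memo).get? i with
  | some v =>
    rw [candyA, hm0]
  | none =>
    have hrange : -(shelf.length : Int) ≤ i ∧ i ≤ (shelf.length : Int) := by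
      rcases hpre with hmem | hr
      · exfalso
        have hs := pvUpdate_isSome memo PySem.Dict.empty i (Or.inr hmem)
        rw [show (PySem.Dict.empty.update memo) = PySem.Dict.ofList memo from rfl, hm0] at hs
        simp at hs
      · exact hr
    obtain ⟨ege, -, -⟩ := candyA_correct shelf (PySem.Dict.ofList memo)
      (((shelf.length : Int) - i).toNat + 1) i (PySem.Dict.ofList memo)
      (fun _ _ h => h) (fun k v h => (pvV_of_mem shelf _ k v h).symm) hrange.2 (by omega)
    rw [ege]
    by_cases h1 : i = (shelf.length : Int)
    · rw [if_pos h1, pvV, hm0, dif_pos (by omega), if_neg (by omega)]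
    · by_cases h2 : i = (shelf.length : Int) - 1
      · rw [if_neg h1, if_pos h2, pvV, hm0, dif_pos (by omega), if_pos h2]
        simp [pvShelfA, pvShelfB]
      · rw [if_neg h1, if_neg h2]
        have hget := bLoop_correct shelf (PySem.Dict.ofList memo) i
          (((shelf.length : Int) - 2 - (i-1)).toNat) ((shelf.length : Int) - 2)
          (PySem.Dict.ofList memo) rfl (by omega) (by omega)
          (fun j hj1 hj2 => absurd hj2 (by omega)) (fun j _ => rfl)
          i (by omega) (by omega)
        rw [hget]
        rfl
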